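-- pv_equiv track=rewrite | github.com/hodaoty/CapstoneProject | model_official/src/utils_clean.py | count_js_protocols
-- ===== SOURCE A (Python) =====
-- def count_js_protocols(s: str) -> int:
--     """Đếm javascript:, vbscript:, data:text/html..."""
--     if not s:
--         return 0
--     s_low = s.lower()
--     pats = [
--         "javascript:",
--         "vbscript:",
--         "data:text/html",
--         "data:text/javascript",
--     ]
--     return sum(s_low.count(p) for p in pats)
-- ===== SOURCE B (Python) =====
-- def count_js_protocols(s: str) -> int:
--     """Đếm javascript:, vbscript:, data:text/html..."""
--     s_low = s.lower()
--     pats = ("javascript:", "vbscript:", "data:text/html", "data:text/javascript")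
--     return sum(
--         sum(1 for p in pats if s_low.startswith(p, i))
--         for i in range(len(s_low))
--     )
-- ===== Notes on version B (the rewrite author's own statement) =====
-- stated objective: alternative
-- what changed: Single forward pass over the lowercased string that tests all four patterns at each position (startswith), replacing A's four separate full str.count scans; correct because none of the patterns can overlap itself.
import Mathlib
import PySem

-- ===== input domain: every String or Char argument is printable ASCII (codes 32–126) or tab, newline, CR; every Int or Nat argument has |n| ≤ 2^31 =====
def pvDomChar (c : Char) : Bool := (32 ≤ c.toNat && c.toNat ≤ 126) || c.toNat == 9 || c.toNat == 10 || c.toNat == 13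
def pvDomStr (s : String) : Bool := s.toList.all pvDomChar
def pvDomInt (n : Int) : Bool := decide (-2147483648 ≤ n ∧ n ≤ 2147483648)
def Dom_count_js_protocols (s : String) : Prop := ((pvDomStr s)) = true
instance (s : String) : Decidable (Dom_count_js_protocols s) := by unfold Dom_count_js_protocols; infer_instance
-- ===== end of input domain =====

-- B replaces A's four separate full str.count scans by a single forward pass that
-- tests all four patterns at each position (objective: alternative decomposition).

-- ===== PORT A =====
def count_js_protocols (s : String) : Int :=
  if s = "" then 0
  else
    let s_low := PySem.Str.lower s
    let pats : List String := ["javascript:", "vbscript:", "data:text/html", "data:text/javascript"]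
    (pats.map (fun p => (PySem.Str.count s_low p : Int))).sum

-- ===== PORT B =====
-- s_low.startswith(p, i) with 0 ≤ i ≤ len(s_low) is exactly `p` being a prefix of the
-- i-th suffix, i.e. PySem.Chars.startswith (s_low.drop i) p (exact on that range of i);
-- sum(1 for p in pats if …) is List.countP over pats.
def count_js_protocols_alt (s : String) : Int :=
  let sl : List Char := (PySem.Str.lower s).toList
  let pats : List (List Char) :=
    ["javascript:".toList, "vbscript:".toList, "data:text/html".toList, "data:text/javascript".toList]
  ((List.range sl.length).map
    (fun i => ((pats.countP (fun p => PySem.Chars.startswith (sl.drop i) p) : Nat) : Int))).sum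

-- ===== PRECONDITION & SPEC =====
def Spec_count_js_protocols (s : String) (out : Int) : Prop := out = count_js_protocols_alt s
instance (s : String) (out : Int) : Decidable (Spec_count_js_protocols s out) := by unfold Spec_count_js_protocols; infer_instance

-- ===== CLAIM (what is proved, stated in full; the proofs are below) =====
def Claim_equal_count_js_protocols : Prop := ∀ (s : String), Dom_count_js_protocols s → Spec_count_js_protocols s (count_js_protocols s)

-- ===== LEMMAS AND PROOFS =====

theorem count_go_nil (sub : List Char) (fuel acc : Nat) :
    PySem.Chars.count.go sub fuel [] acc = acc := by
  cases fuel
  · rw [PySem.Chars.count.go]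
  · rw [PySem.Chars.count.go]; omega

theorem count_go_cons (sub : List Char) (fuel : Nat) (a : Char) (t : List Char) (acc : Nat) :
    PySem.Chars.count.go sub (fuel+1) (a::t) acc =
      if sub.isPrefixOf (a::t) then PySem.Chars.count.go sub fuel ((a::t).drop sub.length) (acc+1)
      else PySem.Chars.count.go sub fuel t acc := by
  rw [PySem.Chars.count.go]

-- A self-overlap-free pattern occurs non-overlappingly, so Python's str.count scan equals
-- the number of positions at which the pattern starts.
theorem count_go_eq (sub : List Char) (hne : sub ≠ [])
    (hov : ∀ d, d < sub.length → 0 < d → ¬ sub.drop d <+: sub) :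
    ∀ (fuel : Nat) (l : List Char) (acc : Nat), l.length ≤ fuel →
      PySem.Chars.count.go sub fuel l acc =
        acc + (List.range l.length).countP (fun i => decide (sub <+: l.drop i)) := by
  intro fuel
  induction fuel with
  | zero =>
    intro l acc hlen
    have hl : l = [] := List.eq_nil_of_length_eq_zero (Nat.le_zero.mp hlen)
    subst hl; simp [count_go_nil]
  | succ n ih =>
    intro l acc hlen
    cases l with
    | nil => simp [count_go_nil]
    | cons a t =>
      rw [count_go_cons]
      by_cases hpre : sub.isPrefixOf (a::t)
      · rw [if_pos hpre]
        have hp : sub <+: (a::t) := List.isPrefixOf_iff_prefix.mp hpre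
        have hlensub : sub.length ≤ (a::t).length := hp.length_le
        have hdroplen : ((a::t).drop sub.length).length = (a::t).length - sub.length := by
          simp
        have hs1 : sub.length ≠ 0 := fun h => hne (List.eq_nil_of_length_eq_zero h)
        rw [ih _ _ (by simp at hlen ⊢; omega)]
        -- split the range of positions at sub.length
        have hsplit : (a::t).length = sub.length + ((a::t).length - sub.length) := by omega
        rw [hdroplen]
        rw [show (List.range (a::t).length) =
              List.range sub.length ++
                (List.range ((a::t).length - sub.length)).map (fun x => sub.length + x) by
          rw [← List.range_add, ← hsplit]]
        rw [List.countP_append, List.countP_map]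
        -- positions 0 < d < sub.length carry no occurrence
        have hnotmid : ∀ d, 0 < d → d < sub.length → ¬ sub <+: (a::t).drop d := by
          intro d hd hdl hcon
          obtain ⟨r, hr⟩ := hp
          have h1 : sub.drop d <+: (a::t).drop d := by
            rw [← hr, List.drop_append_of_le_length (Nat.le_of_lt hdl)]
            exact ⟨r, rfl⟩
          have h2 : sub.drop d <+: sub :=
            List.prefix_of_prefix_length_le h1 hcon (by simp)
          exact hov d hdl hd h2
        have hfirst : (List.range sub.length).countP (fun i => decide (sub <+: (a::t).drop i)) = 1 := by
          obtain ⟨k, hk⟩ : ∃ k, sub.length = k + 1 := by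
            cases hsl : sub.length with
            | zero => exact absurd (List.eq_nil_of_length_eq_zero hsl) hne
            | succ k => exact ⟨k, rfl⟩
          rw [hk, List.range_succ_eq_map, List.countP_cons, List.countP_map]
          have hz : (List.range k).countP
              ((fun i => decide (sub <+: (a::t).drop i)) ∘ Nat.succ) = 0 := by
            rw [List.countP_eq_zero]
            intro i hi
            simp only [Function.comp, decide_eq_true_eq]
            exact hnotmid (i+1) (Nat.succ_pos i) (by rw [hk]; simp only [List.mem_range] at hi; omega)
          simp only [hz]
          simp [hp]
        rw [hfirst]
        have hshift : ∀ i : Nat, ((a::t).drop sub.length).drop i = (a::t).drop (sub.length + i) := by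
          intro i; rw [List.drop_drop]
        have : (List.range ((a::t).length - sub.length)).countP
              (fun i => decide (sub <+: ((a::t).drop sub.length).drop i)) =
            (List.range ((a::t).length - sub.length)).countP
              ((fun i => decide (sub <+: (a::t).drop i)) ∘ fun x => sub.length + x) := by
          apply List.countP_congr
          intro i _
          simp only [Function.comp, hshift]
        rw [this]
        omega
      · rw [if_neg hpre]
        have hnp : ¬ sub <+: (a::t) := fun h => hpre (List.isPrefixOf_iff_prefix.mpr h)
        rw [ih _ _ (by simp at hlen ⊢; omega)]
        rw [show (a::t).length = t.length + 1 by simp]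
        rw [List.range_succ_eq_map, List.countP_cons, List.countP_map]
        have : (List.range t.length).countP
              ((fun i => decide (sub <+: (a::t).drop i)) ∘ Nat.succ) =
            (List.range t.length).countP (fun i => decide (sub <+: t.drop i)) := by
          apply List.countP_congr; intro i _; simp [Function.comp]
        simp [hnp, this]

theorem count_eq_countP (sub l : List Char) (hne : sub ≠ [])
    (hov : ∀ d, d < sub.length → 0 < d → ¬ sub.drop d <+: sub) :
    PySem.Chars.count l sub =
      (List.range l.length).countP (fun i => decide (sub <+: l.drop i)) := by
  rw [PySem.Chars.count, if_neg (by simpa [List.isEmpty_iff] using hne)]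
  simpa using count_go_eq sub hne hov l.length l 0 le_rfl

-- Fubini over positions and patterns (Nat-valued).
theorem sum_map_add_nat {α : Type} (l : List α) (f g : α → Nat) :
    (l.map (fun x => f x + g x)).sum = (l.map f).sum + (l.map g).sum := by
  induction l with
  | nil => simp
  | cons a t ih => simp [ih]; omega

theorem sum_map_ite_eq_countP {α : Type} (l : List α) (p : α → Bool) :
    (l.map (fun x => if p x then 1 else 0)).sum = l.countP p := by
  induction l with
  | nil => simp
  | cons a t ih =>
    by_cases h : p a
    · simp [h, ih]; omega
    · simp [h, ih]

theorem fubini_countP {α β : Type} (pats : List α) (idx : List β) (q : α → β → Bool) :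
    (idx.map (fun i => pats.countP (fun p => q p i))).sum =
      (pats.map (fun p => idx.countP (q p))).sum := by
  induction pats with
  | nil => simp [List.countP_nil]
  | cons p ps ih =>
    simp only [List.map_cons, List.sum_cons, List.countP_cons]
    rw [sum_map_add_nat idx (fun i => ps.countP (fun p' => q p' i)) (fun i => if q p i then 1 else 0)]
    rw [sum_map_ite_eq_countP idx (q p), ih]
    omega

theorem sum_map_cast {α : Type} (l : List α) (f : α → Nat) :
    (l.map (fun x => ((f x : Nat) : Int))).sum = (((l.map f).sum : Nat) : Int) := by
  induction l with
  | nil => simp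
  | cons a t ih => simp [ih]

-- ===== VERDICT (by name: the statement is the Claim_ definition above) =====
theorem count_js_protocols_spec : Claim_equal_count_js_protocols := by
  intro s _
  unfold Spec_count_js_protocols count_js_protocols count_js_protocols_alt
  by_cases hs : s = ""
  · subst hs
    simp [PySem.Str.toList_lower, PySem.Chars.lower]
  · rw [if_neg hs]
    set sl : List Char := (PySem.Str.lower s).toList with hsl
    have hcnt : ∀ p : String, PySem.Str.count (PySem.Str.lower s) p = PySem.Chars.count sl p.toList := by
      intro p; rw [PySem.Str.count_eq]
    have key : ∀ p : List Char, p ≠ [] →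
        (∀ d, d < p.length → 0 < d → ¬ p.drop d <+: p) →
        PySem.Chars.count sl p = (List.range sl.length).countP (fun i => decide (p <+: sl.drop i)) :=
      fun p h1 h2 => count_eq_countP p sl h1 h2
    have hstart : ∀ (i : Nat) (p : List Char),
        PySem.Chars.startswith (sl.drop i) p = decide (p <+: sl.drop i) := by
      intro i p
      by_cases h : p <+: sl.drop i
      · simp only [h, decide_true]
        exact (PySem.Chars.startswith_iff _ _).mpr h
      · simp only [h, decide_false]
        exact Bool.eq_false_iff.mpr (fun hc => h ((PySem.Chars.startswith_iff _ _).mp hc))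
    simp only [List.map_cons, List.map_nil, List.sum_cons, List.sum_nil]
    rw [hcnt, hcnt, hcnt, hcnt]
    rw [key "javascript:".toList (by decide) (by decide),
        key "vbscript:".toList (by decide) (by decide),
        key "data:text/html".toList (by decide) (by decide),
        key "data:text/javascript".toList (by decide) (by decide)]
    simp only [hstart]
    rw [sum_map_cast (List.range sl.length)
        (fun i => ["javascript:".toList, "vbscript:".toList, "data:text/html".toList,
            "data:text/javascript".toList].countP (fun p => decide (p <+: sl.drop i)))]
    rw [fubini_countP ["javascript:".toList, "vbscript:".toList, "data:text/html".toList,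
          "data:text/javascript".toList] (List.range sl.length)
          (fun p i => decide (p <+: sl.drop i))]
    simp only [List.map_cons, List.map_nil, List.sum_cons, List.sum_nil]
    push_cast
    ring
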